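-- pv_equiv track=rewrite | github.com/CrossLangNV/pero-ocr | pero_ocr/document_ocr/layout.py | narrow_label
-- ===== SOURCE A (Python) =====
-- def narrow_label(label, logit, idx_of_last, on_one_liberal=False):
--     last_char = None
--     repeating = []
--     for i, item in enumerate(label):
--         if last_char == item and last_char != idx_of_last:
--             repeating.extend([i])
--         else:
--             if repeating != []:
--                 high = repeating[0]
--                 for e, elem in enumerate(repeating):
--                     if on_one_liberal:
--                         label[elem] = idx_of_last - 1
--                     else:
--                         label[elem] = idx_of_last
--                 label[high] = last_char
--         if last_char != item:
--             repeating = []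
--             if item != idx_of_last:
--                 repeating.append(i)
--         last_char = item
--     if repeating != []:
--         high = repeating[0]
--         for i, item in enumerate(repeating):
--             if on_one_liberal:
--                 label[item] = idx_of_last - 1
--             else:
--                 label[item] = idx_of_last
--         label[high] = last_char
--
--     return label
-- ===== SOURCE B (Python) =====
-- def narrow_label(label, logit, idx_of_last, on_one_liberal=False):
--     blank = idx_of_last - 1 if on_one_liberal else idx_of_last
--     n = len(label)
--     pos = 0
--     while pos < n:
--         value = label[pos]
--         end = pos + 1
--         while end < n and label[end] == value:
--             end += 1
--         if value != idx_of_last: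
--             for j in range(pos + 1, end):
--                 label[j] = blank
--         pos = end
--     return label
-- ===== Notes on version B (the rewrite author's own statement) =====
-- stated objective: simpler
-- what changed: A's element-wise scan with a deferred 'repeating' index buffer (blank the whole run, then restore its first element) is replaced by a direct run-grouping loop: find each maximal run of equal values and blank only its tail in one range write.
import Mathlib
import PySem

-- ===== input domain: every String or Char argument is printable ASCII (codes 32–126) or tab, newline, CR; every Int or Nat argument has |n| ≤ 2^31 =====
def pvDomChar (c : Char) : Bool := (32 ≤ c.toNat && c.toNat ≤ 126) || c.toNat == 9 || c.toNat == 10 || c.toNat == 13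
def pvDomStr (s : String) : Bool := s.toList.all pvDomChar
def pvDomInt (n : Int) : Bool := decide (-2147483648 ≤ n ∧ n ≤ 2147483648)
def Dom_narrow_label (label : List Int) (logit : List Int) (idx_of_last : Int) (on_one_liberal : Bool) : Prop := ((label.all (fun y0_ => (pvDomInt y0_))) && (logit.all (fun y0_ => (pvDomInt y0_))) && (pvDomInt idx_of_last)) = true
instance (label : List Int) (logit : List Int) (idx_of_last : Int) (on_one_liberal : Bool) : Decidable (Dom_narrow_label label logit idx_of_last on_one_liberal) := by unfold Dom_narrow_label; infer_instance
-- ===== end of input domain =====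

-- B replaces A's stateful scan (deferred flush of a collected index buffer) by a plain
-- run-grouping loop: find each maximal run, blank its tail in one range write.  Objective: simpler.
-- Both Pythons mutate `label` in place and return it; the equivalence proved is about the return value.

-- ===== PORT A =====
-- flush of the `repeating` buffer: blank every collected index, then restore the run value at the first
def nlFlushA (idx_of_last : Int) (on_one_liberal : Bool)
    (lbl : List Int) (last : Option Int) (rep : List Int) : List Int :=
  if rep ≠ [] then
    let lbl' := rep.foldl
      (fun l e => PySem.List.pySetD l e (if on_one_liberal then idx_of_last - 1 else idx_of_last)) lbl
    -- `last.getD 0`: Python's last_char is always set when `repeating` is nonempty, so the default is never read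
    PySem.List.pySetD lbl' rep.headI (last.getD 0)
  else lbl

-- loop body of A; state = (label, last_char, repeating); `last ≠ some idx` is Python's `last_char != idx_of_last`
def nlStepA (idx_of_last : Int) (on_one_liberal : Bool)
    (st : List Int × Option Int × List Int) (p : Int × Int) : List Int × Option Int × List Int :=
  if st.2.1 = some p.2 ∧ st.2.1 ≠ some idx_of_last then
    (st.1, some p.2, st.2.2 ++ [p.1])
  else
    (nlFlushA idx_of_last on_one_liberal st.1 st.2.1 st.2.2, some p.2,
     if st.2.1 ≠ some p.2 then (if p.2 ≠ idx_of_last then [p.1] else []) else st.2.2)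

def narrow_label (label : List Int) (logit : List Int) (idx_of_last : Int) (on_one_liberal : Bool) : List Int :=
  let st := (PySem.List.enumerate label 0).foldl (nlStepA idx_of_last on_one_liberal) (label, none, [])
  nlFlushA idx_of_last on_one_liberal st.1 st.2.1 st.2.2

-- ===== PORT B =====
-- Source B's inner `while end < n and label[end] == value`
def nlRunEnd (lbl : List Int) (v : Int) (e : Nat) : Nat :=
  if h : e < lbl.length then
    if lbl[e] = v then nlRunEnd lbl v (e + 1) else e
  else e
termination_by lbl.length - e

-- termination facts for nlLoopB (cited in its decreasing_by)
lemma nlRunEnd_ge (lbl : List Int) (v : Int) (e : Nat) : e ≤ nlRunEnd lbl v e := by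
  fun_induction nlRunEnd lbl v e <;> omega

lemma nlWriteLen (b : Int) (js : List Int) (l : List Int) :
    (js.foldl (fun l j => PySem.List.pySetD l j b) l).length = l.length := by
  induction js generalizing l with
  | nil => rfl
  | cons j js ih => simp [List.foldl, ih, PySem.List.length_pySetD]

-- Source B's outer `while pos < n` loop
def nlLoopB (idx_of_last blank : Int) (lbl : List Int) (pos : Nat) : List Int :=
  if h : pos < lbl.length then
    let v := lbl[pos]
    let e := nlRunEnd lbl v (pos + 1)
    let lbl' := if v ≠ idx_of_last then
        (PySem.List.pyRange ((pos : Int) + 1) (e : Int) 1).foldl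
          (fun l j => PySem.List.pySetD l j blank) lbl
      else lbl
    nlLoopB idx_of_last blank lbl' e
  else lbl
termination_by lbl.length - pos
decreasing_by
  have h1 := nlRunEnd_ge lbl lbl[pos] (pos + 1)
  split <;> first
    | (rename_i hv; rw [nlWriteLen]; omega)
    | omega

def narrow_label_alt (label : List Int) (logit : List Int) (idx_of_last : Int) (on_one_liberal : Bool) : List Int :=
  nlLoopB idx_of_last (if on_one_liberal then idx_of_last - 1 else idx_of_last) label 0

-- ===== PRECONDITION & SPEC =====
def Spec_narrow_label (label : List Int) (logit : List Int) (idx_of_last : Int) (on_one_liberal : Bool) (out : List Int) : Prop := out = narrow_label_alt label logit idx_of_last on_one_liberal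
instance (label : List Int) (logit : List Int) (idx_of_last : Int) (on_one_liberal : Bool) (out : List Int) : Decidable (Spec_narrow_label label logit idx_of_last on_one_liberal out) := by unfold Spec_narrow_label; infer_instance

-- ===== CLAIM (what is proved, stated in full; the proofs are below) =====
def Claim_equal_narrow_label : Prop := ∀ (label : List Int) (logit : List Int) (idx_of_last : Int) (on_one_liberal : Bool), Dom_narrow_label label logit idx_of_last on_one_liberal → Spec_narrow_label label logit idx_of_last on_one_liberal (narrow_label label logit idx_of_last on_one_liberal)

-- ===== LEMMAS AND PROOFS =====

-- the common value both programs compute: an element becomes `blank` iff it equals its predecessor and is not idx_of_last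
def nlSpec (idx blank : Int) : Option Int → List Int → List Int
  | _, [] => []
  | last, x :: xs => (if last = some x ∧ x ≠ idx then blank else x) :: nlSpec idx blank (some x) xs

-- writing `b` at position P.length of P ++ x :: s
lemma nlSetAt (P : List Int) (x : Int) (s : List Int) (v : Int) :
    PySem.List.pySetD (P ++ x :: s) ((P.length : Nat) : Int) v = P ++ v :: s := by
  rw [PySem.List.pySetD_natCast]
  simp

-- blanking a contiguous range: the shared write loop of both flushes
lemma nlSetRange (b : Int) (r : List Int) : ∀ (P s : List Int),
    (PySem.List.pyRange ((P.length : Nat) : Int) (((P.length : Nat) : Int) + r.length) 1).foldl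
      (fun l j => PySem.List.pySetD l j b) (P ++ r ++ s)
    = P ++ List.replicate r.length b ++ s := by
  induction r with
  | nil =>
    intro P s
    rw [PySem.List.pyRange_one_eq_nil (by simp)]
    simp
  | cons x rr ih =>
    intro P s
    rw [PySem.List.pyRange_one_cons (by simp only [List.length_cons]; push_cast; omega)]
    have h1 : P ++ x :: rr ++ s = P ++ x :: (rr ++ s) := by simp
    rw [List.foldl_cons, h1, nlSetAt]
    have h2 : P ++ b :: (rr ++ s) = (P ++ [b]) ++ rr ++ s := by simp
    have h3 : ((P.length : Nat) : Int) + 1 = (((P ++ [b]).length : Nat) : Int) := by simp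
    have h4 : ((P.length : Nat) : Int) + (x :: rr).length
        = (((P ++ [b]).length : Nat) : Int) + rr.length := by push_cast; simp; omega
    rw [h2, h3, h4, ih (P ++ [b]) s]
    simp [List.replicate_succ]

lemma nlRunEnd_eq (v : Int) (t : List Int) : ∀ (P : List Int),
    nlRunEnd (P ++ t) v P.length = P.length + (t.takeWhile (· = v)).length := by
  induction t with
  | nil => intro P; rw [nlRunEnd]; simp
  | cons y t ih =>
    intro P
    rw [nlRunEnd]
    rw [dif_pos (by simp)]
    have hy : (P ++ y :: t)[P.length]'(by simp) = y := by
      simp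
    rw [hy]
    by_cases h : y = v
    · subst h
      have h2 : P ++ y :: t = (P ++ [y]) ++ t := by simp
      have h3 : P.length + 1 = (P ++ [y]).length := by simp
      rw [if_pos rfl, h2, h3, ih (P ++ [y])]
      simp [List.takeWhile_cons]
      omega
    · rw [if_neg h]
      simp [List.takeWhile_cons, h]

-- a run of v after a different (or absent) predecessor: head kept, tail blanked unless v = idx
lemma nlSpec_run (idx blank v : Int) (t : List Int) :
    nlSpec idx blank (some v) t
      = List.replicate (t.takeWhile (· = v)).length (if v = idx then v else blank)
        ++ nlSpec idx blank none (t.dropWhile (· = v)) := by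
  induction t with
  | nil => simp [nlSpec]
  | cons y t ih =>
    by_cases h : y = v
    · subst h
      simp only [nlSpec, List.takeWhile_cons, List.dropWhile_cons]
      by_cases hvi : y = idx
      · subst hvi
        rw [ih]
        simp [List.replicate_succ]
      · simp [hvi, ih, List.replicate_succ]
    · have hne : ¬ (some v = some y) := by simpa using fun e => h e.symm
      simp [nlSpec, List.takeWhile_cons, List.dropWhile_cons, h, hne]

lemma nlLoopB_eq (idx blank : Int) : ∀ (n : Nat) (xs P : List Int), xs.length ≤ n →
    nlLoopB idx blank (P ++ xs) P.length = P ++ nlSpec idx blank none xs := by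
  intro n
  induction n with
  | zero =>
    intro xs P h
    have hx : xs = [] := by cases xs <;> simp_all
    subst hx
    rw [nlLoopB]
    simp [nlSpec]
  | succ n ih =>
    intro xs P h
    match xs with
    | [] => rw [nlLoopB]; simp [nlSpec]
    | v :: t =>
      rw [nlLoopB, dif_pos (by simp)]
      have hv : (P ++ v :: t)[P.length]'(by simp) = v := by simp
      simp only [hv]
      set r := t.takeWhile (· = v) with hrdef
      set s := t.dropWhile (· = v) with hsdef
      have hts : r ++ s = t := List.takeWhile_append_dropWhile
      have he : nlRunEnd (P ++ v :: t) v (P.length + 1) = P.length + 1 + r.length := by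
        have h2 : P ++ v :: t = (P ++ [v]) ++ t := by simp
        have h3 : P.length + 1 = (P ++ [v]).length := by simp
        rw [h2, h3, nlRunEnd_eq]
      rw [he]
      have hsn : s.length ≤ n := by
        have : s.length ≤ t.length := List.length_dropWhile_le _ _
        simp at h; omega
      have hrrep : r = List.replicate r.length v := by
        rw [List.eq_replicate_iff]
        exact ⟨rfl, fun b hb => by simpa using List.mem_takeWhile_imp hb⟩
      by_cases hvi : v = idx
      · rw [if_neg (by simp [hvi])]
        have hl : P ++ v :: t = (P ++ v :: r) ++ s := by rw [← hts]; simp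
        have hp : P.length + 1 + r.length = (P ++ v :: r).length := by
          rw [List.length_append, List.length_cons]; omega
        rw [hl, hp, ih s (P ++ v :: r) hsn]
        have hspec : nlSpec idx blank none (v :: t)
            = v :: (List.replicate r.length v ++ nlSpec idx blank none s) := by
          simp only [nlSpec]
          rw [nlSpec_run idx blank v t, ← hrdef, ← hsdef, if_pos hvi]
          simp
        rw [hspec, ← hrrep]
        simp
      · rw [if_pos hvi]
        have hl : P ++ v :: t = (P ++ [v]) ++ r ++ s := by rw [← hts]; simp
        have hc1 : ((P.length : Nat) : Int) + 1 = (((P ++ [v]).length : Nat) : Int) := by simp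
        have hc2 : ((P.length + 1 + r.length : Nat) : Int)
            = (((P ++ [v]).length : Nat) : Int) + r.length := by push_cast; simp
        rw [hl, hc1, hc2, nlSetRange]
        have hassoc : (P ++ [v]) ++ List.replicate r.length blank ++ s
            = ((P ++ [v]) ++ List.replicate r.length blank) ++ s := by simp
        have hp : P.length + 1 + r.length = ((P ++ [v]) ++ List.replicate r.length blank).length := by
          simp only [List.length_append, List.length_replicate, List.length_cons,
            List.length_nil]
        rw [hassoc, hp, ih s _ hsn]
        have hspec : nlSpec idx blank none (v :: t)
            = v :: (List.replicate r.length blank ++ nlSpec idx blank none s) := by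
          simp only [nlSpec]
          rw [nlSpec_run idx blank v t, ← hrdef, ← hsdef, if_neg hvi]
          simp
        rw [hspec]
        simp

-- flushing a pending run: blank the whole collected range, then restore the value at its head
lemma nlFlushA_run (idx : Int) (ool : Bool) (Q : List Int) (v : Int) (m : Nat) (hm : 0 < m)
    (rest : List Int) :
    nlFlushA idx ool (Q ++ List.replicate m v ++ rest) (some v)
        (PySem.List.pyRange ((Q.length : Nat) : Int) (((Q.length : Nat) : Int) + m) 1)
      = Q ++ v :: List.replicate (m - 1) (if ool then idx - 1 else idx) ++ rest := by
  obtain ⟨m', rfl⟩ : ∃ m', m = m' + 1 := ⟨m - 1, by omega⟩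
  set blank := (if ool then idx - 1 else idx) with hblank
  have hcons : PySem.List.pyRange ((Q.length : Nat) : Int) (((Q.length : Nat) : Int) + ((m' + 1 : Nat) : Int)) 1
      = ((Q.length : Nat) : Int) :: PySem.List.pyRange (((Q.length : Nat) : Int) + 1) (((Q.length : Nat) : Int) + ((m' + 1 : Nat) : Int)) 1 :=
    PySem.List.pyRange_one_cons (by push_cast; omega)
  have hne : PySem.List.pyRange ((Q.length : Nat) : Int) (((Q.length : Nat) : Int) + ((m' + 1 : Nat) : Int)) 1 ≠ [] := by
    rw [hcons]; exact List.cons_ne_nil _ _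
  rw [nlFlushA, if_pos hne]
  have hfold := nlSetRange blank (List.replicate (m' + 1) v) Q rest
  simp only [List.length_replicate] at hfold
  rw [hfold]
  have hhead : (PySem.List.pyRange ((Q.length : Nat) : Int) (((Q.length : Nat) : Int) + ((m' + 1 : Nat) : Int)) 1).headI
      = ((Q.length : Nat) : Int) := by rw [hcons]; rfl
  rw [hhead]
  have hshape : Q ++ List.replicate (m' + 1) blank ++ rest
      = Q ++ blank :: (List.replicate m' blank ++ rest) := by
    simp [List.replicate_succ]
  rw [hshape, nlSetAt]
  simp

lemma nlA_main (idx : Int) (ool : Bool) : ∀ (xs : List Int), ∀ (Q : List Int) (v : Int) (m : Nat),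
    (v ≠ idx → 0 < m →
      (let st := (PySem.List.enumerate xs (((Q.length + m : Nat)) : Int)).foldl (nlStepA idx ool)
          (Q ++ List.replicate m v ++ xs, some v,
           PySem.List.pyRange ((Q.length : Nat) : Int) (((Q.length : Nat) : Int) + m) 1)
       nlFlushA idx ool st.1 st.2.1 st.2.2)
      = Q ++ v :: List.replicate (m - 1) (if ool then idx - 1 else idx)
          ++ nlSpec idx (if ool then idx - 1 else idx) (some v) xs)
    ∧ ((let st := (PySem.List.enumerate xs ((Q.length : Nat) : Int)).foldl (nlStepA idx ool)
          (Q ++ xs, some idx, [])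
        nlFlushA idx ool st.1 st.2.1 st.2.2)
      = Q ++ nlSpec idx (if ool then idx - 1 else idx) (some idx) xs) := by
  intro xs
  induction xs with
  | nil =>
    intro Q v m
    constructor
    · intro hv hm
      simp only [PySem.List.enumerate_nil, List.foldl_nil]
      rw [nlFlushA_run idx ool Q v m hm]
      simp [nlSpec]
    · simp only [PySem.List.enumerate_nil, List.foldl_nil]
      simp [nlFlushA, nlSpec]
  | cons x t ih =>
    intro Q v m
    set blank := (if ool then idx - 1 else idx) with hblank
    constructor
    · intro hv hm
      obtain ⟨m', rfl⟩ : ∃ m', m = m' + 1 := ⟨m - 1, by omega⟩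
      rw [PySem.List.enumerate_cons, List.foldl_cons]
      by_cases hx : x = v
      · subst hx
        rw [show nlStepA idx ool
              (Q ++ List.replicate (m' + 1) x ++ x :: t, some x,
               PySem.List.pyRange ((Q.length : Nat) : Int) (((Q.length : Nat) : Int) + ((m' + 1 : Nat) : Int)) 1)
              (((((Q.length + (m' + 1) : Nat)) : Int)), x)
            = (Q ++ List.replicate (m' + 1) x ++ x :: t, some x,
               PySem.List.pyRange ((Q.length : Nat) : Int) (((Q.length : Nat) : Int) + ((m' + 1 : Nat) : Int)) 1
                 ++ [((Q.length + (m' + 1) : Nat) : Int)]) from by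
          simp [nlStepA, hv]]
        have hrange : PySem.List.pyRange ((Q.length : Nat) : Int) (((Q.length : Nat) : Int) + ((m' + 1 : Nat) : Int)) 1
              ++ [((Q.length + (m' + 1) : Nat) : Int)]
            = PySem.List.pyRange ((Q.length : Nat) : Int) (((Q.length : Nat) : Int) + ((m' + 1 + 1 : Nat) : Int)) 1 := by
          have h1 : ((Q.length + (m' + 1) : Nat) : Int) = ((Q.length : Nat) : Int) + ((m' + 1 : Nat) : Int) := by
            omega
          have h2 : ((Q.length : Nat) : Int) + ((m' + 1 + 1 : Nat) : Int)
              = (((Q.length : Nat) : Int) + ((m' + 1 : Nat) : Int)) + 1 := by omega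
          rw [h1, h2, ← PySem.List.pyRange_one_succ_right (by push_cast; omega)]
        have hlist : Q ++ List.replicate (m' + 1) x ++ x :: t
            = Q ++ List.replicate (m' + 1 + 1) x ++ t := by
          simp [List.replicate_succ']
        have hstart : (((Q.length + (m' + 1) : Nat)) : Int) + 1 = (((Q.length + (m' + 1 + 1) : Nat)) : Int) := by
          omega
        rw [hrange, hlist, hstart]
        have := (ih Q x (m' + 1 + 1)).1 hv (by omega)
        simp only at this
        rw [this]
        have hcond : (some x = some x ∧ x ≠ idx) := ⟨rfl, hv⟩
        simp only [nlSpec, if_pos hcond, ← hblank]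
        simp [List.replicate_succ']
        intro h
        exact absurd h hv
      · rw [show nlStepA idx ool
              (Q ++ List.replicate (m' + 1) v ++ x :: t, some v,
               PySem.List.pyRange ((Q.length : Nat) : Int) (((Q.length : Nat) : Int) + ((m' + 1 : Nat) : Int)) 1)
              (((((Q.length + (m' + 1) : Nat)) : Int)), x)
            = (nlFlushA idx ool (Q ++ List.replicate (m' + 1) v ++ x :: t) (some v)
                 (PySem.List.pyRange ((Q.length : Nat) : Int) (((Q.length : Nat) : Int) + ((m' + 1 : Nat) : Int)) 1),
               some x,
               if x ≠ idx then [((Q.length + (m' + 1) : Nat) : Int)] else []) from by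
          simp [nlStepA, Ne.symm hx]]
        rw [nlFlushA_run idx ool Q v (m' + 1) (by omega)]
        set Q' := Q ++ v :: List.replicate (m' + 1 - 1) blank with hQ'
        have hQlen : Q.length + (m' + 1) = Q'.length := by simp [hQ']
        by_cases hxi : x = idx
        · subst hxi
          rw [if_neg (by simp)]
          have hlist : Q' ++ x :: t = (Q' ++ [x]) ++ t := by simp
          have hstart : (((Q.length + (m' + 1) : Nat)) : Int) + 1 = (((Q' ++ [x]).length : Nat) : Int) := by
            simp only [List.length_append, List.length_cons, List.length_nil, ← hQlen]
            omega
          rw [hlist, hstart]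
          have := (ih (Q' ++ [x]) v 0).2
          simp only at this
          rw [this]
          have hcond : ¬ (some v = some x ∧ x ≠ x) := by simp
          simp only [nlSpec, if_neg hcond, ← hblank]
          simp [hQ']
        · rw [if_pos (by simpa using hxi)]
          have hsing : [((Q.length + (m' + 1) : Nat) : Int)]
              = PySem.List.pyRange ((Q'.length : Nat) : Int) (((Q'.length : Nat) : Int) + ((1 : Nat) : Int)) 1 := by
            rw [← hQlen]
            push_cast
            rw [PySem.List.pyRange_one_singleton]
          have hlist : Q' ++ x :: t = Q' ++ List.replicate 1 x ++ t := by simp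
          have hstart : (((Q.length + (m' + 1) : Nat)) : Int) + 1 = (((Q'.length + 1 : Nat)) : Int) := by
            rw [← hQlen]; omega
          rw [hsing, hlist, hstart]
          have := (ih Q' x 1).1 hxi (by omega)
          simp only at this
          rw [this]
          have hcond : ¬ (some v = some x ∧ x ≠ idx) := by
            simp; intro h; exact absurd h.symm hx
          simp only [nlSpec, if_neg hcond, ← hblank]
          simp [hQ']
    · rw [PySem.List.enumerate_cons, List.foldl_cons]
      rw [show nlStepA idx ool (Q ++ x :: t, some idx, []) (((((Q.length : Nat)) : Int)), x)
          = (nlFlushA idx ool (Q ++ x :: t) (some idx) [], some x,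
             if some idx ≠ some x then (if x ≠ idx then [((Q.length : Nat) : Int)] else []) else []) from by
        simp [nlStepA]]
      rw [show nlFlushA idx ool (Q ++ x :: t) (some idx) [] = Q ++ x :: t from by
        rw [nlFlushA, if_neg (by simp)]]
      by_cases hxi : x = idx
      · subst hxi
        rw [if_neg (by simp)]
        have hlist : Q ++ x :: t = (Q ++ [x]) ++ t := by simp
        have hstart : (((Q.length : Nat)) : Int) + 1 = ((((Q ++ [x]).length : Nat)) : Int) := by
          simp only [List.length_append, List.length_cons, List.length_nil]
          omega
        rw [hlist, hstart]
        have := (ih (Q ++ [x]) v 0).2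
        simp only at this
        rw [this]
        have hcond : ¬ (some x = some x ∧ x ≠ x) := by simp
        simp only [nlSpec, if_neg hcond, ← hblank]
        simp
      · rw [if_pos (by simp; exact fun h => absurd h.symm hxi), if_pos (by simpa using hxi)]
        have hsing : [((Q.length : Nat) : Int)]
            = PySem.List.pyRange ((Q.length : Nat) : Int) (((Q.length : Nat) : Int) + ((1 : Nat) : Int)) 1 := by
          push_cast
          rw [PySem.List.pyRange_one_singleton]
        have hlist : Q ++ x :: t = Q ++ List.replicate 1 x ++ t := by simp
        have hstart : (((Q.length : Nat)) : Int) + 1 = (((Q.length + 1 : Nat)) : Int) := by omega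
        rw [hsing, hlist, hstart]
        have := (ih Q x 1).1 hxi (by omega)
        simp only at this
        rw [this]
        have hcond : ¬ (some idx = some x ∧ x ≠ idx) := by
          simp; exact fun h => absurd h.symm hxi
        simp only [nlSpec, if_neg hcond, ← hblank]
        simp

lemma nlA_eq (idx : Int) (ool : Bool) (label : List Int) (logit : List Int) :
    narrow_label label logit idx ool = nlSpec idx (if ool then idx - 1 else idx) none label := by
  match label with
  | [] => simp [narrow_label, nlFlushA, nlSpec]
  | x :: t =>
    show (let st := (PySem.List.enumerate (x :: t) 0).foldl (nlStepA idx ool) (x :: t, none, [])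
          nlFlushA idx ool st.1 st.2.1 st.2.2) = _
    rw [PySem.List.enumerate_cons, List.foldl_cons]
    rw [show nlStepA idx ool (x :: t, none, []) ((0 : Int), x)
        = (nlFlushA idx ool (x :: t) none [], some x,
           if x ≠ idx then [(0 : Int)] else []) from by
      simp [nlStepA]]
    rw [show nlFlushA idx ool (x :: t) none [] = x :: t from by
      rw [nlFlushA, if_neg (by simp)]]
    by_cases hxi : x = idx
    · subst hxi
      rw [if_neg (by simp)]
      have hlist : x :: t = [x] ++ t := by simp
      have hstart : (0 : Int) + 1 = ((([x] : List Int).length : Nat) : Int) := by simp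
      rw [hlist, hstart]
      have := (nlA_main x ool t [x] x 0).2
      simp only at this
      rw [this]
      simp [nlSpec]
    · rw [if_pos (by simpa using hxi)]
      have hsing : [(0 : Int)]
          = PySem.List.pyRange ((([] : List Int).length : Nat) : Int)
              (((([] : List Int).length : Nat) : Int) + ((1 : Nat) : Int)) 1 := by
        decide
      have hlist : x :: t = ([] : List Int) ++ List.replicate 1 x ++ t := by simp
      have hstart : (0 : Int) + 1 = (((([] : List Int).length + 1 : Nat)) : Int) := by simp
      rw [hsing, hlist, hstart]
      have := (nlA_main idx ool t [] x 1).1 hxi (by omega)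
      simp only at this
      rw [this]
      simp [nlSpec, hxi]

lemma nlB_eq (idx : Int) (ool : Bool) (label : List Int) (logit : List Int) :
    narrow_label_alt label logit idx ool = nlSpec idx (if ool then idx - 1 else idx) none label := by
  show nlLoopB idx (if ool then idx - 1 else idx) label 0 = _
  have h0 : label = [] ++ label := rfl
  have h1 : (0 : Nat) = ([] : List Int).length := rfl
  rw [h0, h1, nlLoopB_eq idx (if ool then idx - 1 else idx) label.length label [] le_rfl]
  simp

-- ===== VERDICT (by name: the statement is the Claim_ definition above) =====
theorem narrow_label_spec : Claim_equal_narrow_label := by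
  intro label logit idx ool _
  unfold Spec_narrow_label
  rw [nlA_eq idx ool label logit, nlB_eq idx ool label logit]
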